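-- pv_equiv track=rewrite | github.com/bensimner/rattle | src/rattle/utils/itertools.py | find_exactly_one
-- ===== SOURCE A (Python) =====
-- def find_exactly_one(
--     xs,
-- ):
--     """like any(xs)
--     except returns the found object or raises ValueError
--     only accepts
--     """
--     b = False
--     v = None
--     for x in xs:
--         if x:
--             if b:
--                 raise ValueError("duplicate found")
--             else:
--                 v = x
--                 b = True
--     if b:
--         return v
--     else:
--         raise ValueError("cannot find")
-- ===== SOURCE B (Python) =====
-- def find_exactly_one(xs):
--     # Staged passes: materialize, count all truthy elements (no early exit),
--     # then locate the unique one in a second pass.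
--     xs = list(xs)
--     n = sum(1 for x in xs if x)
--     if n == 0:
--         raise ValueError("cannot find")
--     if n > 1:
--         raise ValueError("duplicate found")
--     return next(x for x in xs if x)
-- ===== Notes on version B (the rewrite author's own statement) =====
-- stated objective: alternative
-- what changed: Replaces A's single short-circuiting flag-and-value loop with two staged passes: a full counting pass over all elements that classifies the input (none / one / many truthy) up front, then a separate locating pass that retrieves the unique truthy element; there is no early exit and no in-loop state beyond the count.
import Mathlib
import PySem

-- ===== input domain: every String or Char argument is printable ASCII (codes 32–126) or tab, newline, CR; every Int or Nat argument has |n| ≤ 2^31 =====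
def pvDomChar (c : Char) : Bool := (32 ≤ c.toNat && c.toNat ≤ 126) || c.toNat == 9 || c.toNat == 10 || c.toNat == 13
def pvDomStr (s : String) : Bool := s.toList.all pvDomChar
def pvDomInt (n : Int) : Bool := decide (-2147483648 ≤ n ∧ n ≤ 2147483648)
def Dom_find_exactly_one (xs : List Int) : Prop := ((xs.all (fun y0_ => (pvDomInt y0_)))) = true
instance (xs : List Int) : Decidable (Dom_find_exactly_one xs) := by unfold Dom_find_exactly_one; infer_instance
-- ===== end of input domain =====

-- B replaces A's single flag-loop by two staged passes (count all truthy, then locate the unique one);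
-- equivalence is proved on inputs with exactly one nonzero element (elsewhere A raises ValueError).


-- ===== PORT A =====
-- the for-loop with flag b and value v; none = ValueError (raise excluded by Pre_)
def findLoopA : List Int → Bool → Int → Option Int
  | [], b, v => if b then some v else none
  | x :: xs, b, v =>
      if x ≠ 0 then
        if b then none else findLoopA xs true x
      else findLoopA xs b v

def find_exactly_one (xs : List Int) : Int := (findLoopA xs false 0).getD 0

-- ===== PORT B =====
-- n = sum(1 for x in xs if x); classify by n, then next(x for x in xs if x)
def find_exactly_one_alt (xs : List Int) : Int :=
  let n := xs.countP (fun x => x ≠ 0)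
  if n = 0 then 0            -- raise ValueError "cannot find" (excluded by Pre_)
  else if n > 1 then 0       -- raise ValueError "duplicate found" (excluded by Pre_)
  else (xs.find? (fun x => x ≠ 0)).getD 0

-- ===== PRECONDITION & SPEC =====
-- Pre_ admits exactly the inputs where A returns: those with exactly one truthy (nonzero) element.
def Pre_find_exactly_one (xs : List Int) : Prop := xs.countP (fun x => x ≠ 0) = 1
instance (xs : List Int) : Decidable (Pre_find_exactly_one xs) := by unfold Pre_find_exactly_one; infer_instance
def pvWitness_find_exactly_one : List Int := [0, 7, 0]

def Spec_find_exactly_one (xs : List Int) (out : Int) : Prop := out = find_exactly_one_alt xs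
instance (xs : List Int) (out : Int) : Decidable (Spec_find_exactly_one xs out) := by unfold Spec_find_exactly_one; infer_instance

-- ===== CLAIM =====
def Claim_equal_find_exactly_one : Prop := ∀ (xs : List Int), Dom_find_exactly_one xs → Pre_find_exactly_one xs → Spec_find_exactly_one xs (find_exactly_one xs)

-- ===== LEMMAS AND PROOFS =====

-- once the flag is set, A's loop returns v iff no further truthy element occurs
theorem findLoopA_true (xs : List Int) (v : Int) :
    findLoopA xs true v = if xs.countP (fun x => x ≠ 0) = 0 then some v else none := by
  induction xs with
  | nil => simp [findLoopA]
  | cons x xs ih =>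
    by_cases hx : x = 0 <;> simp [findLoopA, hx, ih]

-- before the flag is set, A's loop finds the first truthy element and demands it is the only one
theorem findLoopA_false (xs : List Int) (v : Int) :
    findLoopA xs false v =
      match xs.find? (fun x => x ≠ 0) with
      | none => none
      | some w => if (xs.countP (fun x => x ≠ 0)) = 1 then some w else none := by
  induction xs generalizing v with
  | nil => simp [findLoopA]
  | cons x xs ih =>
    by_cases hx : x = 0
    · simpa [findLoopA, hx] using ih v
    · simp only [findLoopA, findLoopA_true, List.find?_cons, List.countP_cons]
      simp [hx]

-- ===== VERDICT =====
theorem find_exactly_one_spec : Claim_equal_find_exactly_one := by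
  intro xs _ hpre
  unfold Spec_find_exactly_one find_exactly_one find_exactly_one_alt
  rw [findLoopA_false]
  unfold Pre_find_exactly_one at hpre
  cases h : xs.find? (fun x => x ≠ 0) with
  | none =>
    exfalso
    have : xs.countP (fun x => x ≠ 0) = 0 := by
      rw [List.countP_eq_zero]
      intro a ha
      have := List.find?_eq_none.mp h a ha
      simpa using this
    omega
  | some w =>
    have hpre' : xs.countP (fun x => !decide (x = 0)) = 1 := by simpa using hpre
    simp [hpre']
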